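-- pv_equiv track=rewrite | github.com/hrkim28/TCT | 20190214/TCT_20190214_KimJinKwui.py | validate_parity
-- ===== SOURCE A (Python) =====
-- def validate_parity(in_parity_matrix):
--     sum = 0
--     fail_count = 0
--     fail_row_list = []
--     fail_col_list = []
--
--     for inx, row_matrix in enumerate(in_parity_matrix):
--         sum = 0
--         for value in row_matrix:
--             sum += int(value)
--         if sum % 2 != 0:
--             fail_row_list.append(inx)
--             fail_count += 1
--
--     for inx, row_matrix in enumerate(in_parity_matrix):
--         sum = 0
--         for jnx, row_matrix_second in enumerate(in_parity_matrix):
--             sum += int(row_matrix_second[inx])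
--         if sum % 2 != 0:
--             fail_col_list.append(inx)
--             fail_count += 1
--
--     if fail_count == 0:
--         return "OK"
--     elif len(fail_row_list) == 1 and len(fail_col_list) == 1:
--         return "Change bit (" + str(fail_row_list[0]+1) + "," + str(fail_col_list[0]+1) + ")"
--     else:
--         return "Corrupt"
-- ===== SOURCE B (Python) =====
-- def validate_parity(in_parity_matrix):
--     n = len(in_parity_matrix)
--     col_sums = [0] * n
--     fail_row_list = []
--     for inx, row in enumerate(in_parity_matrix):
--         s = 0
--         for value in row:
--             s += int(value)
--         if s % 2 != 0:
--             fail_row_list.append(inx)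
--         col_sums = [c + int(v) for c, v in zip(col_sums, row)]
--     fail_col_list = [j for j in range(n) if col_sums[j] % 2 != 0]
--     if not fail_row_list and not fail_col_list:
--         return "OK"
--     if len(fail_row_list) == 1 and len(fail_col_list) == 1:
--         return "Change bit (" + str(fail_row_list[0] + 1) + "," + str(fail_col_list[0] + 1) + ")"
--     return "Corrupt"
-- ===== Notes on version B (the rewrite author's own statement) =====
-- stated objective: alternative
-- what changed: B makes a single pass over the matrix, maintaining running column sums with zip while checking each row's parity, instead of A's second loop that re-scans the whole matrix once per column; the final OK/Change/Corrupt branching is kept.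
import Mathlib
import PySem

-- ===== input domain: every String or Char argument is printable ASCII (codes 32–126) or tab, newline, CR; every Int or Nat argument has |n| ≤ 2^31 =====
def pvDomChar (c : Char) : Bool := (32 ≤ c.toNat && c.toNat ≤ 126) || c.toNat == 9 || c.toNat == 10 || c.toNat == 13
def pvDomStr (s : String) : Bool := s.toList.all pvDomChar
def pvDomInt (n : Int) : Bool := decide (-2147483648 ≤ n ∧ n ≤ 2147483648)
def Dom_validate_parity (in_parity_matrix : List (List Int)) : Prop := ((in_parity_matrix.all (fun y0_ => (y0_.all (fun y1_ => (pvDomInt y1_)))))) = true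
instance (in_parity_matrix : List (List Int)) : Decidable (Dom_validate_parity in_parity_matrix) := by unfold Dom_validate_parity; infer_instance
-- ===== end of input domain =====

-- B replaces A's per-column re-scan of the whole matrix by one pass that carries running
-- column sums; same return value on every input where A returns (Pre_ excludes A's IndexError).

-- ===== PORT A =====
def validate_parity (in_parity_matrix : List (List Int)) : String :=
  let rowRes := (PySem.List.enumerate in_parity_matrix).foldl
    (fun (st : List Int × Int) p =>
      let sum := p.2.foldl (fun s v => s + v) 0
      if PySem.Int.mod sum 2 ≠ 0 then (st.1 ++ [p.1], st.2 + 1) else st)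
    ([], 0)
  let colRes := (PySem.List.enumerate in_parity_matrix).foldl
    (fun (st : List Int × Int) p =>
      let sum := (PySem.List.enumerate in_parity_matrix).foldl
        (fun s q => s + PySem.List.pyGetD q.2 p.1 0) 0
      if PySem.Int.mod sum 2 ≠ 0 then (st.1 ++ [p.1], st.2 + 1) else st)
    ([], rowRes.2)
  if colRes.2 = 0 then "OK"
  else if rowRes.1.length = 1 ∧ colRes.1.length = 1 then
    "Change bit (" ++ PySem.Int.toStr (PySem.List.pyGetD rowRes.1 0 0 + 1) ++ ","
      ++ PySem.Int.toStr (PySem.List.pyGetD colRes.1 0 0 + 1) ++ ")"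
  else "Corrupt"

-- ===== PORT B =====
def validate_parity_alt (in_parity_matrix : List (List Int)) : String :=
  let n := in_parity_matrix.length
  let st := (PySem.List.enumerate in_parity_matrix).foldl
    (fun (st : List Int × List Int) p =>
      let s := p.2.foldl (fun s v => s + v) 0
      (if PySem.Int.mod s 2 ≠ 0 then st.1 ++ [p.1] else st.1,
       List.zipWith (fun c v => c + v) st.2 p.2))
    ([], List.replicate n 0)
  let fail_col_list := (PySem.List.pyRange 0 (n : Int) 1).filter
    (fun j => decide (PySem.Int.mod (PySem.List.pyGetD st.2 j 0) 2 ≠ 0))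
  if st.1 = [] ∧ fail_col_list = [] then "OK"
  else if st.1.length = 1 ∧ fail_col_list.length = 1 then
    "Change bit (" ++ PySem.Int.toStr (PySem.List.pyGetD st.1 0 0 + 1) ++ ","
      ++ PySem.Int.toStr (PySem.List.pyGetD fail_col_list 0 0 + 1) ++ ")"
  else "Corrupt"

-- ===== PRECONDITION & SPEC =====
-- Pre_ excludes exactly the ragged inputs (some row shorter than the matrix height) on which
-- A's column pass raises IndexError; B returns a value there (zip truncates).
def Pre_validate_parity (in_parity_matrix : List (List Int)) : Prop :=
  ∀ row ∈ in_parity_matrix, in_parity_matrix.length ≤ row.length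
instance (in_parity_matrix : List (List Int)) : Decidable (Pre_validate_parity in_parity_matrix) := by unfold Pre_validate_parity; infer_instance
def pvWitness_validate_parity : List (List Int) := [[1, 1], [1, 1]]
def Spec_validate_parity (in_parity_matrix : List (List Int)) (out : String) : Prop := out = validate_parity_alt in_parity_matrix
instance (in_parity_matrix : List (List Int)) (out : String) : Decidable (Spec_validate_parity in_parity_matrix out) := by unfold Spec_validate_parity; infer_instance

-- ===== CLAIM (what is proved, stated in full; the proofs are below) =====
def Claim_equal_validate_parity : Prop := ∀ (in_parity_matrix : List (List Int)), Dom_validate_parity in_parity_matrix → Pre_validate_parity in_parity_matrix → Spec_validate_parity in_parity_matrix (validate_parity in_parity_matrix)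



-- ===== LEMMAS AND PROOFS =====

-- closed forms used only by the proofs
def pvRows (m : List (List Int)) : List Int :=
  ((PySem.List.enumerate m).filter
    (fun p => decide (PySem.Int.mod (p.2.foldl (fun s v => s + v) 0) 2 ≠ 0))).map (fun p => p.1)

def pvColSum (m : List (List Int)) (i : Int) : Int :=
  (PySem.List.enumerate m).foldl (fun s q => s + PySem.List.pyGetD q.2 i 0) 0

def pvColsA (m : List (List Int)) : List Int :=
  ((PySem.List.enumerate m).filter
    (fun p => decide (PySem.Int.mod (pvColSum m p.1) 2 ≠ 0))).map (fun p => p.1)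

-- 'if P x: out.append(f x); count += 1' over a list, in closed form.
theorem pvAppendIfCount {α β : Type} (P : α → Prop) [DecidablePred P] (f : α → β) :
    ∀ (l : List α) (acc : List β) (c : Int),
      l.foldl (fun st p => if P p then (st.1 ++ [f p], st.2 + 1) else st) (acc, c)
      = (acc ++ (l.filter (fun p => decide (P p))).map f,
         c + ((l.filter (fun p => decide (P p))).length : Int)) := by
  intro l
  induction l with
  | nil => intro acc c; simp
  | cons a l ih =>
    intro acc c
    by_cases h : P a
    · simp [List.foldl_cons, h, ih]; omega
    · simp [List.foldl_cons, h, ih]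

theorem pvCsGetD : ∀ (m : List (List Int)) (cs : List Int) (j : Nat), j < cs.length →
    (∀ row ∈ m, cs.length ≤ row.length) →
    (m.foldl (fun cs row => List.zipWith (fun c v => c + v) cs row) cs).getD j 0
      = cs.getD j 0 + (m.map (fun row => row.getD j 0)).sum := by
  intro m
  induction m with
  | nil => intro cs j hj _; simp
  | cons r m ih =>
    intro cs j hj h
    have hr : cs.length ≤ r.length := h r (by simp)
    have hlen : (List.zipWith (fun c v => c + v) cs r).length = cs.length := by
      simp [List.length_zipWith]; omega
    simp only [List.foldl_cons, List.map_cons, List.sum_cons]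
    rw [ih _ j (by omega) (by intro row hrow; rw [hlen]; exact h row (by simp [hrow]))]
    have hz : (List.zipWith (fun c v => c + v) cs r).getD j 0 = cs.getD j 0 + r.getD j 0 := by
      rw [List.getD_eq_getElem _ _ (by omega), List.getD_eq_getElem _ _ hj,
          List.getD_eq_getElem _ _ (by omega), List.getElem_zipWith]
    rw [hz]; ring

-- A in closed form
theorem pvA_eq (m : List (List Int)) :
    validate_parity m =
      if ((0 : Int) + ((pvRows m).length : Int)) + ((pvColsA m).length : Int) = 0 then "OK"
      else if (pvRows m).length = 1 ∧ (pvColsA m).length = 1 then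
        "Change bit (" ++ PySem.Int.toStr (PySem.List.pyGetD (pvRows m) 0 0 + 1) ++ ","
          ++ PySem.Int.toStr (PySem.List.pyGetD (pvColsA m) 0 0 + 1) ++ ")"
      else "Corrupt" := by
  simp only [validate_parity, pvAppendIfCount, pvRows, pvColsA, pvColSum, List.nil_append]
  simp

-- the fold over enumerate only uses the rows
theorem pvFoldSnd {σ : Type} (m : List (List Int)) (g : σ → List Int → σ) (init : σ) :
    (PySem.List.enumerate m).foldl (fun s p => g s p.2) init
      = m.foldl g init := by
  conv_rhs => rw [← PySem.List.map_snd_enumerate m 0]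
  rw [List.foldl_map]

theorem pvColSum_eq (m : List (List Int)) (k : Nat) :
    pvColSum m (↑k) = (m.map (fun row => row.getD k 0)).sum := by
  unfold pvColSum
  rw [pvFoldSnd m (fun s row => s + PySem.List.pyGetD row (↑k) 0) 0, PySem.List.foldl_add]
  simp

-- the running column sums agree with A's per-column sums
theorem pvCol_eq (m : List (List Int)) (h : Pre_validate_parity m) (k : Nat) (hk : k < m.length) :
    PySem.List.pyGetD
      (m.foldl (fun cs row => List.zipWith (fun c v => c + v) cs row)
        (List.replicate m.length 0)) (↑k) 0
      = pvColSum m ↑k := by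
  have hlen : ∀ row ∈ m, (List.replicate m.length (0 : Int)).length ≤ row.length := by
    intro row hrow; simpa using h row hrow
  rw [PySem.List.pyGetD_natCast, pvCsGetD m _ k (by simpa using hk) hlen, pvColSum_eq]
  simp

-- B in closed form
theorem pvB_eq (m : List (List Int)) (h : Pre_validate_parity m) :
    validate_parity_alt m =
      if pvRows m = [] ∧ pvColsA m = [] then "OK"
      else if (pvRows m).length = 1 ∧ (pvColsA m).length = 1 then
        "Change bit (" ++ PySem.Int.toStr (PySem.List.pyGetD (pvRows m) 0 0 + 1) ++ ","
          ++ PySem.Int.toStr (PySem.List.pyGetD (pvColsA m) 0 0 + 1) ++ ")"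
      else "Corrupt" := by
  have hcols :
      (PySem.List.pyRange 0 (m.length : Int) 1).filter
        (fun j => decide (PySem.Int.mod (PySem.List.pyGetD
          (m.foldl (fun cs row => List.zipWith (fun c v => c + v) cs row)
            (List.replicate m.length 0)) j 0) 2 ≠ 0))
      = pvColsA m := by
    unfold pvColsA
    rw [show (List.filter (fun p : Int × List Int => decide (PySem.Int.mod (pvColSum m p.1) 2 ≠ 0))
          (PySem.List.enumerate m))
        = (List.filter ((fun i => decide (PySem.Int.mod (pvColSum m i) 2 ≠ 0))
            ∘ (fun p : Int × List Int => p.1)) (PySem.List.enumerate m)) from rfl,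
      ← List.filter_map, PySem.List.map_fst_enumerate]
    simp only [zero_add]
    refine List.filter_congr ?_
    intro j hj
    rw [PySem.List.mem_pyRange_one] at hj
    obtain ⟨hj0, hjn⟩ := hj
    have hk : j = ((j.toNat : Nat) : Int) := (Int.toNat_of_nonneg hj0).symm
    rw [hk, pvCol_eq m h j.toNat (by omega)]
  simp only [validate_parity_alt, PySem.List.foldl_prod_mk
    (f := fun (s1 : List Int) (p : Int × List Int) =>
      if PySem.Int.mod (p.2.foldl (fun s v => s + v) 0) 2 ≠ 0 then s1 ++ [p.1] else s1)
    (g := fun (s2 : List Int) (p : Int × List Int) =>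
      List.zipWith (fun c v => c + v) s2 p.2),
    PySem.List.foldl_append_ite, pvFoldSnd, List.nil_append, hcols, pvRows]

-- ===== VERDICT (by name: the statement is the Claim_ definition above) =====
theorem validate_parity_spec : Claim_equal_validate_parity := by
  intro m _ hPre
  unfold Spec_validate_parity
  rw [pvA_eq, pvB_eq m hPre]
  refine if_congr ?_ rfl rfl
  rw [List.eq_nil_iff_length_eq_zero, List.eq_nil_iff_length_eq_zero]
  omega
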